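-- pv_equiv track=rewrite | github.com/max-stoddard/uk-housing-model-individual-project | scripts/python/helpers/common/abm_policy_sweep.py | apply_property_overrides
-- ===== SOURCE A (Python) =====
-- from typing import Mapping, Sequence
--
-- def apply_property_overrides(config_text: str, overrides: Mapping[str, str]) -> str:
--     """Apply key=value overrides to a Java properties file."""
--
--     lines = config_text.splitlines()
--     output: list[str] = []
--     seen: set[str] = set()
--     for line in lines:
--         stripped = line.strip()
--         if not stripped or stripped.startswith("#") or "=" not in line:
--             output.append(line)
--             continue
--         key = line.split("=", 1)[0].strip()
--         if key in overrides:
--             output.append(f"{key} = {overrides[key]}")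
--             seen.add(key)
--         else:
--             output.append(line)
--     missing = sorted(set(overrides.keys()) - seen)
--     if missing:
--         raise RuntimeError(f"Missing override keys in config: {missing}")
--     return "\n".join(output) + "\n"
-- ===== SOURCE B (Python) =====
-- def apply_property_overrides(config_text: str, overrides) -> str:
--     """Apply key=value overrides to a Java properties file (validation-first, two passes)."""
--     lines = config_text.splitlines()
--     present = {_parse_key(line) for line in lines} - {None}
--     missing = sorted(set(overrides) - present)
--     if missing:
--         raise RuntimeError(f"Missing override keys in config: {missing}")
--     return "\n".join(_rewrite(line, overrides) for line in lines) + "\n"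
--
--
-- def _parse_key(line):
--     stripped = line.strip()
--     if not stripped or stripped.startswith("#") or "=" not in line:
--         return None
--     return line.split("=", 1)[0].strip()
--
--
-- def _rewrite(line, overrides):
--     key = _parse_key(line)
--     if key is not None and key in overrides:
--         return f"{key} = {overrides[key]}"
--     return line
-- ===== Notes on version B (the rewrite author's own statement) =====
-- stated objective: alternative
-- what changed: Replaced A's single fold threading an output list and a 'seen' set with a validation-first two-pass design: one pass collects the set of parsed keys, missing overrides are checked via set difference before any output exists, and the result is rebuilt by mapping a pure per-line rewrite helper.
import Mathlib
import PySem

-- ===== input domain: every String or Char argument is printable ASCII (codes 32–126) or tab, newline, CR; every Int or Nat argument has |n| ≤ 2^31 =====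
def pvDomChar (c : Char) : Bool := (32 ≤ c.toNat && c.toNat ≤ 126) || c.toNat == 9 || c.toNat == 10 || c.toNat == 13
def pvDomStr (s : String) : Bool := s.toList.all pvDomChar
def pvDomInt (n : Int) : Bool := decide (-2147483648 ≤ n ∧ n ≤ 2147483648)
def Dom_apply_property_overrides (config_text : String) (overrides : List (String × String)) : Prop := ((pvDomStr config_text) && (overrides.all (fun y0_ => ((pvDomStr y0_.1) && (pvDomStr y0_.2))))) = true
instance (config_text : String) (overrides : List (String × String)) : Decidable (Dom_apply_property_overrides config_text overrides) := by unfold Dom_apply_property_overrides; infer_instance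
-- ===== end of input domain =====

-- B is a different decomposition of A: a validation-first two-pass rewrite (collect present keys,
-- check for missing overrides, then rebuild by mapping a per-line rewrite) instead of A's single
-- fold that threads an output list and a 'seen' accumulator. Equivalence is about the return value;
-- the RuntimeError inputs (an override key matching no property line) are excluded by Pre_.

-- ===== PORT A =====
-- loop body of A's for-loop, named so the fold can be stated over it (literal transliteration)
def pvStepA (overrides : PySem.Dict String String)
    (st : List String × PySem.Set String) (line : String) : List String × PySem.Set String :=
  if PySem.Str.strip line == "" || PySem.Str.startswith (PySem.Str.strip line) "#" || !PySem.Str.isIn "=" line then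
    (st.1 ++ [line], st.2)
  else
    if overrides.contains (PySem.Str.strip (((PySem.Str.splitMax? line "=" 1).getD []).headD "")) then
      (st.1 ++ [PySem.Str.strip (((PySem.Str.splitMax? line "=" 1).getD []).headD "") ++ " = " ++ overrides.getD (PySem.Str.strip (((PySem.Str.splitMax? line "=" 1).getD []).headD "")) ""], st.2.add (PySem.Str.strip (((PySem.Str.splitMax? line "=" 1).getD []).headD "")))
    else
      (st.1 ++ [line], st.2)

def apply_property_overrides (config_text : String) (overrides : List (String × String)) : String :=
  let ov := PySem.Dict.mk overrides
  let lines := PySem.Str.splitlines config_text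
  let st := lines.foldl (pvStepA ov) ([], PySem.Set.empty)
  let missing := PySem.List.sorted (PySem.Set.diff (PySem.Set.ofList ov.keys) st.2) (fun x => x) false
  if missing ≠ [] then ""  -- Python raises RuntimeError here; these inputs are outside Pre_
  else PySem.Str.join "\n" st.1 ++ "\n"

-- ===== PORT B =====
-- _parse_key helper of Source B
def pvParseKey? (line : String) : Option String :=
  if PySem.Str.strip line == "" || PySem.Str.startswith (PySem.Str.strip line) "#" || !PySem.Str.isIn "=" line then none
  else some (PySem.Str.strip (((PySem.Str.splitMax? line "=" 1).getD []).headD ""))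

-- _rewrite helper of Source B
def pvRewrite (line : String) (overrides : PySem.Dict String String) : String :=
  match pvParseKey? line with
  | some key => if overrides.contains key then key ++ " = " ++ overrides.getD key "" else line
  | none => line

def apply_property_overrides_alt (config_text : String) (overrides : List (String × String)) : String :=
  let ov := PySem.Dict.mk overrides
  let lines := PySem.Str.splitlines config_text
  let present := PySem.Set.ofList (lines.filterMap pvParseKey?)
  let missing := PySem.List.sorted (PySem.Set.diff (PySem.Set.ofList ov.keys) present) (fun x => x) false
  if missing ≠ [] then ""  -- Python raises RuntimeError here; these inputs are outside Pre_
  else PySem.Str.join "\n" (lines.map (fun line => pvRewrite line ov)) ++ "\n"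

-- ===== PRECONDITION & SPEC =====
-- Pre_ excludes exactly the inputs on which A (and B) raise RuntimeError: some override key
-- has no matching key=value line in the config text.
def Pre_apply_property_overrides (config_text : String) (overrides : List (String × String)) : Prop :=
  ∀ k ∈ (PySem.Dict.mk overrides).keys,
    k ∈ (PySem.Str.splitlines config_text).filterMap pvParseKey?

instance (config_text : String) (overrides : List (String × String)) : Decidable (Pre_apply_property_overrides config_text overrides) := by unfold Pre_apply_property_overrides; infer_instance

def pvWitness_apply_property_overrides : String × (List (String × String)) :=
  ("# cfg\na = 1\nb=2\n\nplain text\n", [("a", "10"), ("b", "x y")])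

def Spec_apply_property_overrides (config_text : String) (overrides : List (String × String)) (out : String) : Prop := out = apply_property_overrides_alt config_text overrides
instance (config_text : String) (overrides : List (String × String)) (out : String) : Decidable (Spec_apply_property_overrides config_text overrides out) := by unfold Spec_apply_property_overrides; infer_instance

-- ===== CLAIM (what is proved, stated in full; the proofs are below) =====
def Claim_equal_apply_property_overrides : Prop := ∀ (config_text : String) (overrides : List (String × String)), Dom_apply_property_overrides config_text overrides → Pre_apply_property_overrides config_text overrides → Spec_apply_property_overrides config_text overrides (apply_property_overrides config_text overrides)

-- ===== LEMMAS AND PROOFS =====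

theorem pvStepA_eq (ov : PySem.Dict String String) (st : List String × PySem.Set String)
    (line : String) :
    pvStepA ov st line =
      (st.1 ++ [pvRewrite line ov],
       match pvParseKey? line with
       | some k => if ov.contains k then st.2.add k else st.2
       | none => st.2) := by
  unfold pvStepA pvRewrite pvParseKey?
  by_cases h : (PySem.Str.strip line == "" || PySem.Str.startswith (PySem.Str.strip line) "#" || !PySem.Str.isIn "=" line) = true
  · simp only [if_pos h]
  · simp only [if_neg h]
    by_cases hc : ov.contains (PySem.Str.strip (((PySem.Str.splitMax? line "=" 1).getD []).headD "")) = true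
    · simp only [if_pos hc]
    · simp only [if_neg hc]

theorem pvFold_fst (ov : PySem.Dict String String) (lines : List String)
    (st : List String × PySem.Set String) :
    (lines.foldl (pvStepA ov) st).1 = st.1 ++ lines.map (fun line => pvRewrite line ov) := by
  induction lines generalizing st with
  | nil => simp
  | cons l t ih =>
    simp only [List.foldl_cons, List.map_cons]
    rw [ih, pvStepA_eq]
    simp [List.append_assoc]

theorem pvStepA_snd_some (ov : PySem.Dict String String) (st : List String × PySem.Set String)
    {line k : String} (hp : pvParseKey? line = some k) :
    (pvStepA ov st line).2 = if ov.contains k then st.2.add k else st.2 := by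
  rw [pvStepA_eq, hp]

theorem pvStepA_snd_none (ov : PySem.Dict String String) (st : List String × PySem.Set String)
    {line : String} (hp : pvParseKey? line = none) :
    (pvStepA ov st line).2 = st.2 := by
  rw [pvStepA_eq, hp]

theorem pvFold_snd_mem (ov : PySem.Dict String String) (lines : List String)
    (st : List String × PySem.Set String) (x : String) :
    x ∈ (lines.foldl (pvStepA ov) st).2 ↔
      x ∈ st.2 ∨ (x ∈ lines.filterMap pvParseKey? ∧ ov.contains x = true) := by
  induction lines generalizing st with
  | nil => simp
  | cons l t ih =>
    simp only [List.foldl_cons, List.filterMap_cons]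
    rw [ih]
    cases hp : pvParseKey? l with
    | none => rw [pvStepA_snd_none ov st hp]
    | some k =>
      rw [pvStepA_snd_some ov st hp]
      by_cases hc : ov.contains k = true
      · rw [if_pos hc]
        simp only [PySem.Set.mem_add, List.mem_cons]
        constructor
        · rintro ((h | h) | ⟨h, hx⟩)
          · exact Or.inl h
          · exact Or.inr ⟨Or.inl h, h ▸ hc⟩
          · exact Or.inr ⟨Or.inr h, hx⟩
        · rintro (h | ⟨h | h, hx⟩)
          · exact Or.inl (Or.inl h)
          · exact Or.inl (Or.inr h)
          · exact Or.inr ⟨h, hx⟩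
      · rw [if_neg hc]
        simp only [List.mem_cons]
        constructor
        · rintro (h | ⟨h, hx⟩)
          · exact Or.inl h
          · exact Or.inr ⟨Or.inr h, hx⟩
        · rintro (h | ⟨h | h, hx⟩)
          · exact Or.inl h
          · exact absurd (h ▸ hx) hc
          · exact Or.inr ⟨h, hx⟩

-- the missing-keys list is empty under Pre_, for any 'seen' set containing all config keys
theorem pvMissing_nil (ks : List String) (s : PySem.Set String)
    (h : ∀ k ∈ ks, k ∈ s) :
    PySem.List.sorted (PySem.Set.diff (PySem.Set.ofList ks) s) (fun x => x) false = [] := by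
  rw [PySem.List.sorted_eq_nil_iff]
  rw [List.eq_nil_iff_forall_not_mem]
  intro x hx
  have := (PySem.Set.mem_diff (PySem.Set.ofList ks) s x).1 hx
  exact this.2 (h x ((PySem.Set.mem_ofList ks x).1 this.1))

-- ===== VERDICT (by name: the statement is the Claim_ definition above) =====
theorem apply_property_overrides_spec : Claim_equal_apply_property_overrides := by
  intro config_text overrides _hdom hpre
  unfold Spec_apply_property_overrides
  unfold apply_property_overrides apply_property_overrides_alt
  simp only
  set ov := PySem.Dict.mk overrides with hov
  set lines := PySem.Str.splitlines config_text with hlines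
  have hA : PySem.List.sorted
      (PySem.Set.diff (PySem.Set.ofList ov.keys) (lines.foldl (pvStepA ov) ([], PySem.Set.empty)).2)
      (fun x => x) false = [] := by
    apply pvMissing_nil
    intro k hk
    rw [pvFold_snd_mem]
    exact Or.inr ⟨hpre k hk, (PySem.Dict.contains_iff_mem_keys ov k).2 hk⟩
  have hB : PySem.List.sorted
      (PySem.Set.diff (PySem.Set.ofList ov.keys) (PySem.Set.ofList (lines.filterMap pvParseKey?)))
      (fun x => x) false = [] := by
    apply pvMissing_nil
    intro k hk
    exact (PySem.Set.mem_ofList _ k).2 (hpre k hk)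
  rw [hA, hB]
  simp only [ne_eq, not_true_eq_false, if_false]
  rw [pvFold_fst]
  simp
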